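-- pv_equiv track=rewrite | github.com/StefanoPaesani/LossTolerance | ErrorCorrectionFunctions/EC_DecoderClasses.py | sum_prob_struct_coeffs_dicts
-- ===== SOURCE A (Python) =====
-- from copy import copy
--
-- def sum_prob_struct_coeffs_dicts(prob_dict_list):
--     temp_struct_coeffs_dict = copy(prob_dict_list[0])
--     for temp_prob_dict in prob_dict_list[1:]:
--         for prob_struct in temp_prob_dict:
--             if prob_struct in temp_struct_coeffs_dict:
--                 temp_struct_coeffs_dict[prob_struct] += temp_prob_dict[prob_struct]
--             else:
--                 temp_struct_coeffs_dict[prob_struct] = temp_prob_dict[prob_struct]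
--     return temp_struct_coeffs_dict
-- ===== SOURCE B (Python) =====
-- def sum_prob_struct_coeffs_dicts(prob_dict_list):
--     ordered_keys = dict.fromkeys(k for d in prob_dict_list for k in d)
--     result = {}
--     for k in ordered_keys:
--         vals = [d[k] for d in prob_dict_list if k in d]
--         acc = vals[0]
--         for v in vals[1:]:
--             acc += v
--         result[k] = acc
--     return result
-- ===== Notes on version B (the rewrite author's own statement) =====
-- stated objective: alternative
-- what changed: A streams dict after dict into one accumulator dict with per-key membership updates; B first computes the first-seen key order across all dicts, then builds the result per key by gathering and folding that key's values across the dict list.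
-- outside the precondition, e.g. on sum_prob_struct_coeffs_dicts([]): A raises IndexError, B returns {}
import Mathlib
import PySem

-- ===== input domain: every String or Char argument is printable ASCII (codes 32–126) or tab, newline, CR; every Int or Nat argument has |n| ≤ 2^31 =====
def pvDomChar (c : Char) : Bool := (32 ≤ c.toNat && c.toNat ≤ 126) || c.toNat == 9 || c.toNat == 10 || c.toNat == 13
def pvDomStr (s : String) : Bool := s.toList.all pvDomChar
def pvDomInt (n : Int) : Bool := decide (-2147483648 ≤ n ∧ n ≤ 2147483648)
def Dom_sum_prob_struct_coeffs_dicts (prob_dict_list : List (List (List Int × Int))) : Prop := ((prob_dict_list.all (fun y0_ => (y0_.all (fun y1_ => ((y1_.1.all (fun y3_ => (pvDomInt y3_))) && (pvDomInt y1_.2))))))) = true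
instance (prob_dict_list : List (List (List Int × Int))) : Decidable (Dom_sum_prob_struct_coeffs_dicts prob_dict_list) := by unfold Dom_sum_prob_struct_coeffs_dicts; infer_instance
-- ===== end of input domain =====

-- B re-groups the merge per key (first-seen key order, then per-key fold) instead of A's
-- per-dict streaming accumulate; equivalence of the return values is proved below.


-- ===== PORT A =====
-- 'if prob_struct in dict: dict[k] += v else: dict[k] = v' on the insertion-ordered
-- association list: update in place (keys are distinct under Pre_) or append.
def pvUpd (acc : List (List Int × Int)) (k : List Int) (v : Int) : List (List Int × Int) :=
  if acc.any (fun p => p.1 == k) then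
    acc.map (fun p => if p.1 == k then (p.1, p.2 + v) else p)
  else acc ++ [(k, v)]

-- literal port of A: copy(prob_dict_list[0]), then for each later dict, for each of its
-- keys (distinct under Pre_, so iterating its pairs and using kv.2 is exactly
-- 'for k in d: ... d[k]'), add into / insert into the accumulator dict.
def sum_prob_struct_coeffs_dicts (prob_dict_list : List (List (List Int × Int))) : List (List Int × Int) :=
  (PySem.List.slice prob_dict_list (some 1) none).foldl
    (fun acc d => d.foldl (fun acc kv => pvUpd acc kv.1 kv.2) acc)
    (PySem.List.pyGetD prob_dict_list 0 [])

-- ===== PORT B =====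
-- vals = [d[k] for d in prob_dict_list if k in d]  ('k in d' + 'd[k]' = find? on the pairs)
def pvLookupVals (prob_dict_list : List (List (List Int × Int))) (k : List Int) : List Int :=
  prob_dict_list.filterMap (fun d => (d.find? (fun p => p.1 == k)).map (·.2))

-- literal port of B: first-seen key order via dict.fromkeys over all keys, then per key
-- fold vals[1:] onto vals[0] (result keys are fresh, so dict insertion = append = map).
def sum_prob_struct_coeffs_dicts_alt (prob_dict_list : List (List (List Int × Int))) : List (List Int × Int) :=
  (PySem.List.dedup (prob_dict_list.flatMap (fun d => d.map Prod.fst))).map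
    (fun k =>
      (k, ((pvLookupVals prob_dict_list k).drop 1).foldl (fun acc v => acc + v)
        ((pvLookupVals prob_dict_list k).headD 0)))

-- ===== PRECONDITION & SPEC =====
-- A raises IndexError on []; the Nodup clause only rules out association lists that no
-- Python dict can denote (dict keys are unique), so it excludes no Python input A accepts.
def Pre_sum_prob_struct_coeffs_dicts (prob_dict_list : List (List (List Int × Int))) : Prop :=
  prob_dict_list ≠ [] ∧ ∀ d ∈ prob_dict_list, (d.map Prod.fst).Nodup
instance (prob_dict_list : List (List (List Int × Int))) : Decidable (Pre_sum_prob_struct_coeffs_dicts prob_dict_list) := by unfold Pre_sum_prob_struct_coeffs_dicts; infer_instance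

def pvWitness_sum_prob_struct_coeffs_dicts : (List (List (List Int × Int))) :=
  [[([1], 2), ([2, 3], 5)], [([1], 3)]]

def Spec_sum_prob_struct_coeffs_dicts (prob_dict_list : List (List (List Int × Int))) (out : List (List Int × Int)) : Prop := out = sum_prob_struct_coeffs_dicts_alt prob_dict_list
instance (prob_dict_list : List (List (List Int × Int))) (out : List (List Int × Int)) : Decidable (Spec_sum_prob_struct_coeffs_dicts prob_dict_list out) := by unfold Spec_sum_prob_struct_coeffs_dicts; infer_instance

-- ===== CLAIM (what is proved, stated in full; the proofs are below) =====
def Claim_equal_sum_prob_struct_coeffs_dicts : Prop := ∀ (prob_dict_list : List (List (List Int × Int))), Dom_sum_prob_struct_coeffs_dicts prob_dict_list → Pre_sum_prob_struct_coeffs_dicts prob_dict_list → Spec_sum_prob_struct_coeffs_dicts prob_dict_list (sum_prob_struct_coeffs_dicts prob_dict_list)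
-- ===== LEMMAS AND PROOFS =====

-- canonical form of a merged accumulator: first-seen keys, each paired with the sum of
-- all values carried for it by the pair stream ps
def pvCanon (ps : List (List Int × Int)) : List (List Int × Int) :=
  (PySem.List.dedup (ps.map Prod.fst)).map
    (fun k => (k, ((ps.filter (fun p => p.1 == k)).map Prod.snd).sum))

theorem pvFold_canon (ps : List (List Int × Int)) :
    ps.foldl (fun acc kv => pvUpd acc kv.1 kv.2) [] = pvCanon ps := by
  induction ps using List.reverseRecOn with
  | nil => rfl
  | append_singleton ps q ih =>
    rw [List.foldl_append, List.foldl_cons, List.foldl_nil, ih]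
    unfold pvCanon
    rw [PySem.List.dedup_eq_ofList, PySem.List.dedup_eq_ofList, List.map_append,
      List.map_cons, List.map_nil, PySem.Set.ofList_append_singleton]
    by_cases hmem : q.1 ∈ PySem.Set.ofList (ps.map Prod.fst)
    · have hc : (PySem.Set.ofList (List.map Prod.fst ps)).contains q.1 = true := by
        simpa using hmem
      rw [PySem.Set.add, if_pos hc]
      rw [pvUpd, if_pos ?_, List.map_map]
      · apply List.map_congr_left
        intro k hk
        simp only [Function.comp]
        rw [List.filter_append, List.map_append, List.sum_append]
        by_cases hkq : k = q.1
        · subst hkq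
          simp
        · have h1 : ¬ (q.1 == k) = true := by simpa using fun h => hkq h.symm
          have h2 : ¬ (k == q.1) = true := by simpa using hkq
          simp [h1, h2]
      · simp only [List.any_map, List.any_eq_true, Function.comp]
        exact ⟨q.1, by simpa using hmem, by simp⟩
    · have hc : (PySem.Set.ofList (List.map Prod.fst ps)).contains q.1 = false := by
        simpa using hmem
      rw [PySem.Set.add, if_neg (by rw [hc]; simp)]
      rw [pvUpd, if_neg ?_, List.map_append]
      · have hkne : ∀ k ∈ PySem.Set.ofList (ps.map Prod.fst), k ≠ q.1 := by
          intro k hk he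
          exact hmem (he ▸ hk)
        congr 1
        · apply List.map_congr_left
          intro k hk
          have hkq : ¬ (q.1 == k) = true := by
            simpa using fun h => hkne k hk h.symm
          simp [List.filter_append, hkq]
        · have hfe : ps.filter (fun p => p.1 == q.1) = [] := by
            rw [List.filter_eq_nil_iff]
            intro p hp h
            have : p.1 = q.1 := by simpa using h
            exact hmem ((PySem.Set.mem_ofList _ _).mpr (this ▸ List.mem_map_of_mem hp))
          simp [List.filter_append, hfe]
      · simp only [List.any_map, List.any_eq_true, Function.comp]
        rintro ⟨k, hk, hkq⟩
        have : k = q.1 := by simpa using hkq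
        exact hmem (this ▸ hk)

-- a dict (distinct keys) is its own canonical form
theorem pvCanon_self (d : List (List Int × Int)) (h : (d.map Prod.fst).Nodup) :
    pvCanon d = d := by
  induction d with
  | nil => rfl
  | cons p t ih =>
    rw [List.map_cons] at h
    have hp : p.1 ∉ t.map Prod.fst := (List.nodup_cons.mp h).1
    have ht : (t.map Prod.fst).Nodup := (List.nodup_cons.mp h).2
    unfold pvCanon
    rw [PySem.List.dedup_eq_ofList, List.map_cons, PySem.Set.ofList_cons]
    have hnd : PySem.Set.discard (PySem.Set.ofList (t.map Prod.fst)) p.1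
        = PySem.Set.ofList (t.map Prod.fst) := by
      rw [PySem.Set.discard]
      apply List.filter_eq_self.mpr
      intro y hy
      have hyk : y ∈ t.map Prod.fst := (PySem.Set.mem_ofList _ _).mp hy
      have : y ≠ p.1 := fun he => hp (he ▸ hyk)
      simpa using this
    rw [hnd, List.map_cons]
    have htf : t.filter (fun q => q.1 == p.1) = [] := by
      rw [List.filter_eq_nil_iff]
      intro q hq he
      have : q.1 = p.1 := by simpa using he
      exact hp (this ▸ List.mem_map_of_mem hq)
    congr 1
    · rw [List.filter_cons_of_pos (by simp), htf]
      simp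
    · have hstep : List.map
          (fun k => (k, (List.map Prod.snd (List.filter (fun q => q.1 == k) (p :: t))).sum))
          (PySem.Set.ofList (t.map Prod.fst))
          = List.map
          (fun k => (k, (List.map Prod.snd (List.filter (fun q => q.1 == k) t)).sum))
          (PySem.Set.ofList (t.map Prod.fst)) := by
        apply List.map_congr_left
        intro k hk
        have hkm : k ∈ t.map Prod.fst := (PySem.Set.mem_ofList _ _).mp hk
        have hkp : ¬ (p.1 == k) = true := by
          simpa using fun he => hp ((he : p.1 = k) ▸ hkm)
        simp [hkp]
      rw [hstep]
      have := ih ht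
      unfold pvCanon at this
      rw [PySem.List.dedup_eq_ofList] at this
      exact this

-- A's result is the canonical form of the flattened pair stream
theorem pvA_canon (l : List (List (List Int × Int))) (hne : l ≠ [])
    (h0 : ∀ d ∈ l, (d.map Prod.fst).Nodup) :
    sum_prob_struct_coeffs_dicts l = pvCanon (l.flatMap id) := by
  obtain ⟨d, t, rfl⟩ := List.exists_cons_of_ne_nil hne
  unfold sum_prob_struct_coeffs_dicts
  rw [PySem.List.slice_from_one]
  have hstep : ∀ (t : List (List (List Int × Int))) (acc : List (List Int × Int)),
      t.foldl (fun acc d => d.foldl (fun acc kv => pvUpd acc kv.1 kv.2) acc) acc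
        = (t.flatMap id).foldl (fun acc kv => pvUpd acc kv.1 kv.2) acc := by
    intro t
    induction t with
    | nil => intro acc; rfl
    | cons d t ih =>
      intro acc
      rw [List.foldl_cons, ih, List.flatMap_cons, List.foldl_append]
      rfl
  have hfirst : PySem.List.pyGetD (d :: t) (0 : Int) ([] : List (List Int × Int)) = d := by
    simp [PySem.List.pyGetD_zero_cons]
  rw [List.tail_cons, hfirst, hstep]
  have hd : d = d.foldl (fun acc kv => pvUpd acc kv.1 kv.2) [] := by
    rw [pvFold_canon, pvCanon_self d (h0 d (by simp))]
  conv_lhs => rw [hd]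
  rw [← List.foldl_append, List.flatMap_cons, id_eq]
  exact pvFold_canon _

-- per-dict: find?-lookup agrees with filter on a dict with distinct keys
theorem pvFind_filter (d : List (List Int × Int)) (k : List Int)
    (h : (d.map Prod.fst).Nodup) :
    ((d.find? (fun p => p.1 == k)).map (·.2)).toList
      = (d.filter (fun p => p.1 == k)).map Prod.snd := by
  induction d with
  | nil => rfl
  | cons p t ih =>
    rw [List.map_cons] at h
    have hp : p.1 ∉ t.map Prod.fst := (List.nodup_cons.mp h).1
    have ht : (t.map Prod.fst).Nodup := (List.nodup_cons.mp h).2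
    by_cases hpk : (p.1 == k) = true
    · have hk : p.1 = k := by simpa using hpk
      have htf : t.filter (fun q => q.1 == k) = [] := by
        rw [List.filter_eq_nil_iff]
        intro q hq hqe
        have : q.1 = k := by simpa using hqe
        exact hp (hk ▸ this ▸ List.mem_map_of_mem hq)
      simp [hpk, htf]
    · simp only [List.find?_cons, List.filter_cons, hpk]
      exact ih ht

-- B's per-key value list flattens against the pair stream
theorem pvVals_filter (l : List (List (List Int × Int))) (k : List Int)
    (h : ∀ d ∈ l, (d.map Prod.fst).Nodup) :
    pvLookupVals l k = ((l.flatMap id).filter (fun p => p.1 == k)).map Prod.snd := by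
  induction l with
  | nil => rfl
  | cons d t ih =>
    rw [List.flatMap_cons, List.filter_append, List.map_append, id_eq]
    unfold pvLookupVals
    rw [List.filterMap_cons]
    have hd := pvFind_filter d k (h d (by simp))
    have hrest := ih (fun d hd' => h d (by simp [hd']))
    unfold pvLookupVals at hrest
    cases hf : (d.find? (fun p => p.1 == k)) with
    | none =>
      rw [hf] at hd
      simp only [Option.map_none]
      rw [← hd, hrest]
      simp
    | some p =>
      rw [hf] at hd
      simp only [Option.map_some]
      rw [← hd, hrest]
      simp

-- the headD/foldl value fold is the sum
theorem pvFold_sum (vals : List Int) :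
    (vals.drop 1).foldl (fun acc v => acc + v) (vals.headD 0) = vals.sum := by
  cases vals with
  | nil => rfl
  | cons v t =>
    simp [PySem.List.foldl_add t (fun x => x) v]

-- B's result is the same canonical form
theorem pvB_canon (l : List (List (List Int × Int)))
    (h : ∀ d ∈ l, (d.map Prod.fst).Nodup) :
    sum_prob_struct_coeffs_dicts_alt l = pvCanon (l.flatMap id) := by
  unfold sum_prob_struct_coeffs_dicts_alt pvCanon
  have hkeys : l.flatMap (fun d => d.map Prod.fst) = (l.flatMap id).map Prod.fst := by
    rw [List.map_flatMap]
    rfl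
  rw [hkeys]
  apply List.map_congr_left
  intro k _
  rw [pvVals_filter l k h, pvFold_sum]

-- ===== VERDICT (by name: the statement is the Claim_ definition above) =====
theorem sum_prob_struct_coeffs_dicts_spec : Claim_equal_sum_prob_struct_coeffs_dicts := by
  intro l _ hpre
  obtain ⟨hne, hnodup⟩ := hpre
  unfold Spec_sum_prob_struct_coeffs_dicts
  rw [pvA_canon l hne hnodup, pvB_canon l hnodup]
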